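-- pv_equiv track=rewrite | github.com/nhossain819/Python | AllGreaterThan.py | greaterthan_25
-- ===== SOURCE A (Python) =====
-- def greaterthan_25(list_of_numbers):
--    test_list = []
--    for i in list_of_numbers:
--         if i >= 25:
--             test_list.append(1)
--         else:
--             test_list.append(0)
--    if max(test_list) == 0:
--        return "All numbers less than 25"
--    else:
--        return "Atleast one number greater than or equal to 25"
-- ===== SOURCE B (Python) =====
-- def greaterthan_25(list_of_numbers):
--     if max(list_of_numbers) >= 25:
--         return "Atleast one number greater than or equal to 25"
--     else:
--         return "All numbers less than 25"
-- ===== Notes on version B (the rewrite author's own statement) =====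
-- stated objective: simpler
-- what changed: Drops the 0/1 indicator-list pass entirely and compares max(list_of_numbers) against 25 directly.
import Mathlib
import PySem

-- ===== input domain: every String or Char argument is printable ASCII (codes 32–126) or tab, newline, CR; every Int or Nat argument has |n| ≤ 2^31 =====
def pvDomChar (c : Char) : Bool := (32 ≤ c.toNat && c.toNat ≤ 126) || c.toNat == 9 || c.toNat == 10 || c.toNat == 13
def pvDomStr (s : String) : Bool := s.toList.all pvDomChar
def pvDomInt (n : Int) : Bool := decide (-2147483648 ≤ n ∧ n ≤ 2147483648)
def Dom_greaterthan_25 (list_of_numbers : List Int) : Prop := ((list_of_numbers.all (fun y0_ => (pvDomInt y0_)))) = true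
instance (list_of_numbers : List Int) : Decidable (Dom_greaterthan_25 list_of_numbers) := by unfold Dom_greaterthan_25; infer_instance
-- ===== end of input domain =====

-- B drops A's 0/1 indicator-list pass and compares max(list_of_numbers) against 25 directly;
-- return-value equivalence on nonempty lists (both raise ValueError on []).

-- ===== PORT A =====
def greaterthan_25 (list_of_numbers : List Int) : String :=
  -- test_list built by appending 1/0 per element
  let test_list : List Int :=
    list_of_numbers.foldl (fun acc i => acc ++ [if i ≥ 25 then (1 : Int) else 0]) []
  match PySem.List.max? test_list (fun x => x) with
  | none => ""   -- max([]) raises ValueError; excluded by Pre_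
  | some m => if m = 0 then "All numbers less than 25"
              else "Atleast one number greater than or equal to 25"

-- ===== PORT B =====
def greaterthan_25_alt (list_of_numbers : List Int) : String :=
  match PySem.List.max? list_of_numbers (fun x => x) with
  | none => ""   -- max([]) raises ValueError; excluded by Pre_
  | some m => if m ≥ 25 then "Atleast one number greater than or equal to 25"
              else "All numbers less than 25"

-- ===== PRECONDITION & SPEC =====
-- Pre_ excludes only the empty list, on which A (and B) raise ValueError from max([]).
def Pre_greaterthan_25 (list_of_numbers : List Int) : Prop := list_of_numbers ≠ []
instance (list_of_numbers : List Int) : Decidable (Pre_greaterthan_25 list_of_numbers) := by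
  unfold Pre_greaterthan_25; infer_instance
def pvWitness_greaterthan_25 : List Int := [24, 25]

def Spec_greaterthan_25 (list_of_numbers : List Int) (out : String) : Prop := out = greaterthan_25_alt list_of_numbers
instance (list_of_numbers : List Int) (out : String) : Decidable (Spec_greaterthan_25 list_of_numbers out) := by unfold Spec_greaterthan_25; infer_instance

-- ===== CLAIM (what is proved, stated in full; the proofs are below) =====
def Claim_equal_greaterthan_25 : Prop := ∀ (list_of_numbers : List Int), Dom_greaterthan_25 list_of_numbers → Pre_greaterthan_25 list_of_numbers → Spec_greaterthan_25 list_of_numbers (greaterthan_25 list_of_numbers)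

-- ===== LEMMAS AND PROOFS =====

-- the indicator function A maps over the list
def pvFlag (i : Int) : Int := if i ≥ 25 then 1 else 0

theorem pvFoldl_append_map (xs : List Int) (acc : List Int) :
    xs.foldl (fun acc i => acc ++ [if i ≥ 25 then (1 : Int) else 0]) acc
      = acc ++ xs.map pvFlag := by
  induction xs generalizing acc with
  | nil => simp
  | cons a t ih => simp [List.foldl_cons, ih, pvFlag]

theorem pvFlag_max (a b : Int) : pvFlag (max a b) = max (pvFlag a) (pvFlag b) := by
  unfold pvFlag
  rcases le_total a b with h | h <;> split_ifs <;> omega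

theorem pvFoldl_max_map (t : List Int) (x : Int) :
    (t.map pvFlag).foldl max (pvFlag x) = pvFlag (t.foldl max x) := by
  induction t generalizing x with
  | nil => rfl
  | cons a s ih => simp [List.foldl_cons, ← pvFlag_max, ih]

-- ===== VERDICT (by name: the statement is the Claim_ definition above) =====
theorem greaterthan_25_spec : Claim_equal_greaterthan_25 := by
  intro xs _ hpre
  unfold Spec_greaterthan_25
  match xs with
  | [] => exact absurd rfl hpre
  | x :: t =>
    unfold greaterthan_25 greaterthan_25_alt
    simp only [pvFoldl_append_map, List.nil_append, List.map_cons,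
      PySem.List.max?_id_cons, pvFoldl_max_map]
    set m := t.foldl max x with hm
    unfold pvFlag
    split_ifs <;> first | rfl | omega
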